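-- pv_equiv track=rewrite | github.com/heyday98/Cocoon-AE | examples/table2text/trainer.py | divide_with_last_residue
-- ===== SOURCE A (Python) =====
-- import math
--
-- def divide_with_last_residue(total, divisor):
--     if divisor <= 0:
--         raise ValueError("Divisor must be a positive number.")
--
--     part_value = math.ceil(total / divisor)
--     parts = [part_value] * (divisor - 1)
--     last_part = total - sum(parts)  # residue goes to last partition
--     parts.append(last_part)
--
--     prefix_sum_list = [0]
--     current_sum = 0
--     for part in parts:
--         current_sum += part
--         prefix_sum_list.append(current_sum)
--
--     return prefix_sum_list
-- ===== SOURCE B (Python) =====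
-- import math
--
-- def divide_with_last_residue(total, divisor):
--     if divisor <= 0:
--         raise ValueError("Divisor must be a positive number.")
--     part_value = math.ceil(total / divisor)
--     return [i * part_value for i in range(divisor)] + [total]
-- ===== Notes on version B (the rewrite author's own statement) =====
-- stated objective: simpler
-- what changed: Replaces A's parts list, sum(parts) residue computation and running-accumulator prefix loop with the closed form [i*part_value for i in range(divisor)] + [total].
import Mathlib
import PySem

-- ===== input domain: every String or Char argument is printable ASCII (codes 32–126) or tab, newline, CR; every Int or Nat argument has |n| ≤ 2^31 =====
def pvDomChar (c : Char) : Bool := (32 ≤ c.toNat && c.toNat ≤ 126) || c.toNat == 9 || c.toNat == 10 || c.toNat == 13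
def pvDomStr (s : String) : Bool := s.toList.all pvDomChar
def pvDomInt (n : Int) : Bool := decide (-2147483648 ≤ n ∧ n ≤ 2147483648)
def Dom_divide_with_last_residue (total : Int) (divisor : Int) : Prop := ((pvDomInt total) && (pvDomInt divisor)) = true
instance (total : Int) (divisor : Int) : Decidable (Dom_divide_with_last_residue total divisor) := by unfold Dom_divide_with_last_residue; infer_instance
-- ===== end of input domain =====

-- B replaces A's parts list, sum() residue and running-accumulator prefix loop with the
-- closed form [i*part_value for i in range(divisor)] + [total] (simpler; same cost).
-- math.ceil(total / divisor) on int arguments is ported as exact integer ceiling division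
-- -((-total) // divisor); on Dom (|n| ≤ 2^31) the float division never rounds across an
-- integer boundary, so this is exact.

-- ===== PORT A =====
def divide_with_last_residue (total : Int) (divisor : Int) : List Int :=
  let part_value := -(PySem.Int.floordiv (-total) divisor)
  let parts := List.replicate (divisor - 1).toNat part_value
  let last_part := total - parts.sum
  let parts2 := parts ++ [last_part]
  (parts2.foldl (fun (st : List Int × Int) part => (st.1 ++ [st.2 + part], st.2 + part))
    ([0], 0)).1

-- ===== PORT B =====
def divide_with_last_residue_alt (total : Int) (divisor : Int) : List Int :=
  let part_value := -(PySem.Int.floordiv (-total) divisor)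
  (PySem.List.pyRange 0 divisor 1).map (fun i => i * part_value) ++ [total]

-- ===== PRECONDITION & SPEC =====
-- Pre_: A (and B) raise ValueError when divisor <= 0.
def Pre_divide_with_last_residue (total : Int) (divisor : Int) : Prop := 0 < divisor
instance (total : Int) (divisor : Int) : Decidable (Pre_divide_with_last_residue total divisor) := by unfold Pre_divide_with_last_residue; infer_instance
def pvWitness_divide_with_last_residue : Int × Int := (7, 3)

def Spec_divide_with_last_residue (total : Int) (divisor : Int) (out : List Int) : Prop := out = divide_with_last_residue_alt total divisor
instance (total : Int) (divisor : Int) (out : List Int) : Decidable (Spec_divide_with_last_residue total divisor out) := by unfold Spec_divide_with_last_residue; infer_instance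

-- ===== CLAIM (what is proved, stated in full; the proofs are below) =====
def Claim_equal_divide_with_last_residue : Prop := ∀ (total : Int) (divisor : Int), Dom_divide_with_last_residue total divisor → Pre_divide_with_last_residue total divisor → Spec_divide_with_last_residue total divisor (divide_with_last_residue total divisor)

-- ===== LEMMAS AND PROOFS =====

-- A's prefix-sum loop over `replicate n pv`, characterised in closed form.
theorem fold_replicate (pv : Int) (n : Nat) :
    ∀ (acc : List Int) (c : Int),
    (List.replicate n pv).foldl
      (fun (st : List Int × Int) part => (st.1 ++ [st.2 + part], st.2 + part)) (acc, c)
      = (acc ++ (List.range n).map (fun i : Nat => c + ((i : Int) + 1) * pv), c + n * pv) := by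
  induction n with
  | zero => intro acc c; simp
  | succ n ih =>
    intro acc c
    rw [List.replicate_succ, List.foldl_cons, ih, List.range_succ_eq_map]
    simp only [List.map_cons, List.map_map, Prod.mk.injEq]
    constructor
    · simp only [List.append_assoc, List.cons_append, List.nil_append]
      congr 1
      congr 1
      · ring
      · apply List.map_congr_left
        intro i _
        simp only [Function.comp]
        push_cast
        ring
    · push_cast
      ring

theorem divide_with_last_residue_eq (total divisor : Int) (h : 0 < divisor) :
    divide_with_last_residue total divisor = divide_with_last_residue_alt total divisor := by
  simp only [divide_with_last_residue, divide_with_last_residue_alt]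
  set pv := -(PySem.Int.floordiv (-total) divisor) with hpv
  set n := (divisor - 1).toNat with hn
  have hsum : (List.replicate n pv).sum = (n : Int) * pv := by
    simp [List.sum_replicate]
  rw [List.foldl_append, fold_replicate, hsum]
  simp only [List.foldl_cons, List.foldl_nil]
  have hdiv : divisor = (n : Int) + 1 := by
    simp only [hn]; omega
  rw [hdiv, PySem.List.pyRange_one]
  have h1 : (((n : Int) + 1 - 0).toNat) = n + 1 := by omega
  rw [h1, List.range_succ_eq_map]
  simp only [List.map_cons, List.map_map, List.nil_append, List.cons_append]
  congr 1
  · simp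
  congr 1
  · apply List.map_congr_left
    intro i _
    simp only [Function.comp]
    push_cast
    ring
  · congr 1
    ring

-- ===== VERDICT (by name: the statement is the Claim_ definition above) =====
theorem divide_with_last_residue_spec : Claim_equal_divide_with_last_residue := by
  intro total divisor _ hpre
  exact divide_with_last_residue_eq total divisor hpre
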